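-- pv_equiv track=rewrite | github.com/durandtdd/luna | rsc/generate-opcodes.py | generate_enum_strings
-- ===== SOURCE A (Python) =====
-- def generate_enum_strings(opcodes):
--     """ Create enum strings from opcodes """
--     enum = [opcode[0] for opcode in opcodes if opcode[0]!="invalid"]
--     enum.append("invalid")
--
--     s = "    "
--     for k, e in enumerate(enum):
--         s += "\"" + e + "\", "
--         if k%8 == 7:
--             s += "\n    "
--     s += "\n"
--
--     return s
-- ===== SOURCE B (Python) =====
-- def generate_enum_strings(opcodes):
--     """ Create enum strings from opcodes """
--     enum = [opcode[0] for opcode in opcodes if opcode[0] != "invalid"]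
--     enum.append("invalid")
--     quoted = ['"' + e + '", ' for e in enum]
--     parts = ["    "]
--     for i in range(0, len(quoted), 8):
--         chunk = quoted[i:i + 8]
--         parts.append("".join(chunk))
--         if len(chunk) == 8:
--             parts.append("\n    ")
--     parts.append("\n")
--     return "".join(parts)
-- ===== Notes on version B (the rewrite author's own statement) =====
-- stated objective: alternative
-- what changed: Replaced the per-element accumulation with a k%8==7 modulo check by a group-wise traversal: precompute the quoted pieces, walk them in chunks of 8, join each chunk at once and append the line break exactly when the chunk is full; the result is assembled with one final join instead of repeated string +=.
import Mathlib
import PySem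

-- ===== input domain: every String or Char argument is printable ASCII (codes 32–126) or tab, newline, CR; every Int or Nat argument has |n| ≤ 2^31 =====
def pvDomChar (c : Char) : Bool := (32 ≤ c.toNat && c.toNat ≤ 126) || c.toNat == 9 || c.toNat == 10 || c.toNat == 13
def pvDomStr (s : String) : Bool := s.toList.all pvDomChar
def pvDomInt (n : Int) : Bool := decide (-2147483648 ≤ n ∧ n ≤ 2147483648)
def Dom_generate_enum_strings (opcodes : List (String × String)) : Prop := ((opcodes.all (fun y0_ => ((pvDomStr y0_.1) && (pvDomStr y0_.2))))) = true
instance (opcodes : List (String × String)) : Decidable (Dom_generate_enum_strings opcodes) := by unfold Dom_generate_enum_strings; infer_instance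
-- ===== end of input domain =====

-- B replaces A's per-element accumulation with its k%8==7 check by a chunk-of-8
-- traversal of the precomputed quoted pieces (objective: alternative decomposition).

-- ===== PORT A =====
def generate_enum_strings (opcodes : List (String × String)) : String :=
  let enum := ((opcodes.filter (fun opcode => opcode.1 != "invalid")).map
      (fun opcode => opcode.1)) ++ ["invalid"]
  let s := (PySem.List.enumerate enum 0).foldl
    (fun s ke =>
      let s := s ++ "\"" ++ ke.2 ++ "\", "
      if PySem.Int.mod ke.1 8 == 7 then s ++ "\n    " else s) "    "
  s ++ "\n"

-- ===== PORT B =====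
-- the chunk loop: for i in range(0, len(quoted), 8): join the chunk, newline iff it is full
def pvJoinChunks (quoted : List String) : String :=
  match quoted with
  | [] => ""
  | q :: qs =>
    let chunk := (q :: qs).take 8
    let rest := (q :: qs).drop 8
    PySem.Str.join "" chunk ++ (if chunk.length == 8 then "\n    " else "") ++ pvJoinChunks rest
termination_by quoted.length
decreasing_by simp

def generate_enum_strings_alt (opcodes : List (String × String)) : String :=
  let enum := ((opcodes.filter (fun opcode => opcode.1 != "invalid")).map
      (fun opcode => opcode.1)) ++ ["invalid"]
  let quoted := enum.map (fun e => "\"" ++ e ++ "\", ")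
  "    " ++ pvJoinChunks quoted ++ "\n"

-- ===== PRECONDITION & SPEC =====
def Spec_generate_enum_strings (opcodes : List (String × String)) (out : String) : Prop := out = generate_enum_strings_alt opcodes
instance (opcodes : List (String × String)) (out : String) : Decidable (Spec_generate_enum_strings opcodes out) := by unfold Spec_generate_enum_strings; infer_instance

-- ===== CLAIM (what is proved, stated in full; the proofs are below) =====
def Claim_equal_generate_enum_strings : Prop := ∀ (opcodes : List (String × String)), Dom_generate_enum_strings opcodes → Spec_generate_enum_strings opcodes (generate_enum_strings opcodes)

-- ===== LEMMAS AND PROOFS =====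

-- canonical element-wise rendering of the quoted pieces, over List Char
def pvG : Nat → List String → List Char
  | _, [] => []
  | i, q :: qs => q.toList ++ (if i % 8 == 7 then "\n    ".toList else []) ++ pvG (i + 1) qs

theorem pvJoin_nil_flatten (l : List (List Char)) : PySem.Chars.join [] l = l.flatten := by
  induction l with
  | nil => exact PySem.Chars.join_nil []
  | cons p l ih =>
    cases l with
    | nil => simp [PySem.Chars.join_singleton]
    | cons q r =>
      rw [PySem.Chars.join_cons_cons]
      simp [ih]

theorem pvJoin_toList (c : List String) :
    (PySem.Str.join "" c).toList = (c.map String.toList).flatten := by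
  have h : ("" : String).toList = [] := rfl
  rw [PySem.Str.toList_join]
  rw [h, pvJoin_nil_flatten]

theorem pvG_append (xs ys : List String) : ∀ i : Nat,
    pvG i (xs ++ ys) = pvG i xs ++ pvG (i + xs.length) ys := by
  induction xs with
  | nil => intro i; simp [pvG]
  | cons x xs ih =>
    intro i
    simp only [List.cons_append, pvG, ih (i + 1), List.length_cons, List.append_assoc]
    ring_nf

theorem pvG_mod (qs : List String) : ∀ i j : Nat, i % 8 = j % 8 → pvG i qs = pvG j qs := by
  induction qs with
  | nil => intros; rfl
  | cons q qs ih =>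
    intro i j h
    simp only [pvG, h, ih (i + 1) (j + 1) (by omega)]

theorem pvG_chunk (c : List String) : ∀ i : Nat, c ≠ [] → i + c.length ≤ 8 →
    pvG i c = (c.map String.toList).flatten ++ (if i + c.length = 8 then "\n    ".toList else []) := by
  induction c with
  | nil => intro i h; exact absurd rfl h
  | cons q c ih =>
    intro i _ hle
    cases c with
    | nil =>
      simp only [List.length_cons, List.length_nil] at hle ⊢
      have hcond : (i % 8 == 7) = decide (i + 0 + 1 = 8) := by
        have hi : i % 8 = i := Nat.mod_eq_of_lt (by omega)
        rw [hi]
        by_cases h7 : i = 7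
        · subst h7; simp
        · have h8 : ¬ (i + 0 + 1 = 8) := by omega
          simp [h7, h8]
      simp [pvG, hcond]
    | cons r c =>
      simp only [List.length_cons] at hle
      have hi7 : (i % 8 == 7) = false := by
        have : i % 8 = i := Nat.mod_eq_of_lt (by omega)
        simp [this]; omega
      conv_lhs => rw [pvG]
      rw [ih (i + 1) (by simp) (by simp only [List.length_cons]; omega)]
      have hnum : i + 1 + (r :: c).length = i + (q :: r :: c).length := by
        simp only [List.length_cons]; omega
      rw [hnum]
      simp [hi7, List.append_assoc]

theorem pvJoinChunks_empty : (pvJoinChunks ([] : List String)).toList = [] := by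
  rw [pvJoinChunks.eq_def]; rfl

theorem pvJoinChunks_toList (qs : List String) :
    (pvJoinChunks qs).toList = pvG 0 qs := by
  induction hn : qs.length using Nat.strong_induction_on generalizing qs with
  | _ n ih =>
  match qs with
  | [] => rw [pvJoinChunks.eq_def]; rfl
  | q :: qs' =>
    rw [pvJoinChunks.eq_def]
    dsimp only
    by_cases hle : (q :: qs').length ≤ 8
    · have htake : (q :: qs').take 8 = q :: qs' := List.take_of_length_le hle
      have hdrop : (q :: qs').drop 8 = [] := List.drop_eq_nil_of_le hle
      rw [htake, hdrop]
      simp only [String.toList_append, pvJoin_toList, pvJoinChunks_empty]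
      rw [pvG_chunk (q :: qs') 0 (by simp) (by omega)]
      by_cases h8 : (q :: qs').length = 8
      · have hc : ((q :: qs').length == 8) = true := by simp [h8]
        simp [h8]
      · have h7 : ¬ qs'.length = 7 := by
          simp only [List.length_cons] at hle h8; omega
        simp [h7]
    · have htl : ((q :: qs').take 8).length = 8 := by
        simp only [List.length_take]; omega
      have hc : (((q :: qs').take 8).length == 8) = true := by rw [htl]; rfl
      have hlen : (q :: qs').length = n := hn
      have ih' : (pvJoinChunks ((q :: qs').drop 8)).toList = pvG 0 ((q :: qs').drop 8) :=
        ih ((q :: qs').drop 8).length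
          (by simp only [List.length_drop, List.length_cons] at *; omega)
          ((q :: qs').drop 8) rfl
      simp only [String.toList_append, pvJoin_toList, ih', hc, if_true]
      conv_rhs => rw [(List.take_append_drop 8 (q :: qs')).symm]
      rw [pvG_append, htl,
        pvG_chunk ((q :: qs').take 8) 0 (by intro h; rw [h] at htl; simp at htl) (by omega),
        htl, pvG_mod ((q :: qs').drop 8) (0 + 8) 0 (by omega)]
      simp [List.append_assoc]

theorem pvA_fold (enum : List String) : ∀ (i : Nat) (s0 : String),
    ((PySem.List.enumerate enum (i : Int)).foldl
      (fun s ke =>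
        let s := s ++ "\"" ++ ke.2 ++ "\", "
        if PySem.Int.mod ke.1 8 == 7 then s ++ "\n    " else s) s0).toList
    = s0.toList ++ pvG i (enum.map (fun e => "\"" ++ e ++ "\", ")) := by
  induction enum with
  | nil => intro i s0; simp [PySem.List.enumerate, pvG]
  | cons e es ih =>
    intro i s0
    rw [PySem.List.enumerate_cons, List.foldl_cons]
    have hcast : (i : Int) + 1 = ((i + 1 : Nat) : Int) := by push_cast; ring
    rw [hcast]
    have hm : PySem.Int.mod (i : Int) 8 = ((i % 8 : Nat) : Int) := by
      exact_mod_cast PySem.Int.mod_natCast i 8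
    by_cases h7 : i % 8 = 7
    · have hc : (PySem.Int.mod (i : Int) 8 == 7) = true := by
        rw [hm, h7]; rfl
      simp only [hc, if_true]
      rw [ih (i + 1)]
      simp [pvG, h7, List.append_assoc]
    · have hc : (PySem.Int.mod (i : Int) 8 == 7) = false := by
        rw [hm]
        simp only [beq_eq_false_iff_ne, ne_eq]
        exact_mod_cast fun h => h7 (by exact_mod_cast h)
      simp only [hc, Bool.false_eq_true, if_false]
      rw [ih (i + 1)]
      simp [pvG, h7, List.append_assoc]

-- ===== VERDICT (by name: the statement is the Claim_ definition above) =====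
theorem generate_enum_strings_spec : Claim_equal_generate_enum_strings := by
  intro opcodes _
  show generate_enum_strings opcodes = generate_enum_strings_alt opcodes
  apply String.toList_injective
  show ((PySem.List.enumerate
        (((opcodes.filter (fun opcode => opcode.1 != "invalid")).map
            (fun opcode => opcode.1)) ++ ["invalid"]) ((0 : Nat) : Int)).foldl
      (fun s ke =>
        let s := s ++ "\"" ++ ke.2 ++ "\", "
        if PySem.Int.mod ke.1 8 == 7 then s ++ "\n    " else s) "    " ++ "\n").toList
    = ("    " ++ pvJoinChunks
        ((((opcodes.filter (fun opcode => opcode.1 != "invalid")).map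
            (fun opcode => opcode.1)) ++ ["invalid"]).map (fun e => "\"" ++ e ++ "\", ")) ++ "\n").toList
  simp only [String.toList_append, pvA_fold, pvJoinChunks_toList, List.append_assoc]
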